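-- pv_equiv track=rewrite | github.com/bbudiono/repo_agenticseek_os | mlacs_ui_integration_tdd_framework.py | _generate_implementation_status
-- ===== SOURCE A (Python) =====
-- from typing import Dict, List, Any, Optional, Tuple
--
-- def _generate_implementation_status(results: Dict[str, Any]) -> Dict[str, str]:
--     """Generate implementation status summary."""
--     phase_status = {}
--     for phase_key, phase_results in results["phase_results"].items():
--         if phase_results["success_rate"] >= 80:
--             phase_status[phase_key] = "Complete"
--         elif phase_results["success_rate"] >= 50:
--             phase_status[phase_key] = "Partial"
--         else:
--             phase_status[phase_key] = "Needs Work"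
--     return phase_status
-- ===== SOURCE B (Python) =====
-- def _generate_implementation_status(results):
--     """Generate implementation status summary by staged overwrite sweeps:
--     start everything at 'Needs Work', then promote phases meeting each rising cutoff."""
--     phases = results["phase_results"]
--     status = {phase_key: "Needs Work" for phase_key in phases}
--     for label, cutoff in (("Partial", 50), ("Complete", 80)):
--         for phase_key, phase_results in phases.items():
--             if phase_results["success_rate"] >= cutoff:
--                 status[phase_key] = label
--     return status
-- ===== Notes on version B (the rewrite author's own statement) =====
-- stated objective: alternative
-- what changed: Replaces the single-pass three-way if/elif/else cascade with staged overwrite sweeps: every phase is first labelled 'Needs Work', then two promotion passes overwrite the label of phases meeting the rising cutoffs 50 ('Partial') and 80 ('Complete'), relying on dict overwrite-in-place semantics instead of per-element branching.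
import Mathlib
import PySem

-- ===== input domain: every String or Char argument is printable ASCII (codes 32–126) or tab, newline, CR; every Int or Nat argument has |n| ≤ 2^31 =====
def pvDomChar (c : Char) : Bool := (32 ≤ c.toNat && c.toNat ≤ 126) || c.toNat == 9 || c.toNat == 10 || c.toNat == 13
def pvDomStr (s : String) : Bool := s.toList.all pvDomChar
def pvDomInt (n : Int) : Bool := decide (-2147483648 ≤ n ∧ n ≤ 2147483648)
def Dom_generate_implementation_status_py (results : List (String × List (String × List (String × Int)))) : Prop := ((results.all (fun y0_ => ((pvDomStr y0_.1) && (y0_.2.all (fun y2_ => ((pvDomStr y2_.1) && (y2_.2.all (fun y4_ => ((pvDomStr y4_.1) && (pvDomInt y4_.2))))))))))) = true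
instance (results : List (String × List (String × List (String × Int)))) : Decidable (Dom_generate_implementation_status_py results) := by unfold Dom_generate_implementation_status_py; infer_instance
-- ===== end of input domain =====

-- B replaces A's per-element if/elif/else cascade by staged overwrite sweeps: every phase is
-- first labelled "Needs Work", then two promotion passes overwrite labels at cutoffs 50 and 80.


-- ===== PORT A =====
-- literal transliteration of A: look up "phase_results", one loop over its items with a
-- three-way if/elif/else on success_rate, assigning into an accumulator dict.
def generate_implementation_status_py (results : List (String × List (String × List (String × Int)))) : List (String × String) :=
  match (PySem.Dict.mk results).get? "phase_results" with
  | none => []  -- KeyError in Python; excluded by Pre_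
  | some phase_items =>
    (phase_items.foldl
      (fun (phase_status : PySem.Dict String String) p =>
        -- phase_results["success_rate"]: KeyError when absent is excluded by Pre_
        let sr := ((PySem.Dict.mk p.2).get? "success_rate").getD 0
        if sr ≥ 80 then phase_status.insert p.1 "Complete"
        else if sr ≥ 50 then phase_status.insert p.1 "Partial"
        else phase_status.insert p.1 "Needs Work")
      PySem.Dict.empty).items

-- ===== PORT B =====
-- transliteration of B: status = {k: "Needs Work" for k in phases}; then for (label, cutoff)
-- in (("Partial", 50), ("Complete", 80)): overwrite status[k] = label where sr >= cutoff.
def generate_implementation_status_py_alt (results : List (String × List (String × List (String × Int)))) : List (String × String) :=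
  match (PySem.Dict.mk results).get? "phase_results" with
  | none => []  -- KeyError in Python; excluded by Pre_
  | some phase_items =>
    let status0 := PySem.Dict.ofList (phase_items.map (fun p => (p.1, "Needs Work")))
    (([("Partial", (50 : Int)), ("Complete", (80 : Int))]).foldl
      (fun (status : PySem.Dict String String) lc =>
        phase_items.foldl
          (fun (st : PySem.Dict String String) p =>
            if ((PySem.Dict.mk p.2).get? "success_rate").getD 0 ≥ lc.2
            then st.insert p.1 lc.1 else st)
          status)
      status0).items

-- ===== PRECONDITION & SPEC =====
-- Pre_ excludes (a) the inputs on which Python A raises KeyError (missing "phase_results" key,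
-- or a phase dict without a "success_rate" key), and (b) association lists whose phase keys are
-- duplicated, which do not represent any Python dict (a Python dict has unique keys, so no dict
-- argument reaches them; only on such non-dict lists could the two ports' bookkeeping differ).
def Pre_generate_implementation_status_py (results : List (String × List (String × List (String × Int)))) : Prop :=
  (PySem.Dict.mk results).contains "phase_results" = true ∧
  (∀ p ∈ (((PySem.Dict.mk results).get? "phase_results").getD []),
    (PySem.Dict.mk p.2).contains "success_rate" = true) ∧
  ((((PySem.Dict.mk results).get? "phase_results").getD []).map Prod.fst).Nodup
instance (results : List (String × List (String × List (String × Int)))) : Decidable (Pre_generate_implementation_status_py results) := by unfold Pre_generate_implementation_status_py; infer_instance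

def pvWitness_generate_implementation_status_py : (List (String × List (String × List (String × Int)))) :=
  [("phase_results", [("phase_1", [("success_rate", 85)]), ("phase_2", [("success_rate", 50)]), ("phase_3", [("success_rate", 10)])])]

def Spec_generate_implementation_status_py (results : List (String × List (String × List (String × Int)))) (out : List (String × String)) : Prop := out = generate_implementation_status_py_alt results
instance (results : List (String × List (String × List (String × Int)))) (out : List (String × String)) : Decidable (Spec_generate_implementation_status_py results out) := by unfold Spec_generate_implementation_status_py; infer_instance

-- ===== CLAIM (what is proved, stated in full; the proofs are below) =====
def Claim_equal_generate_implementation_status_py : Prop := ∀ (results : List (String × List (String × List (String × Int)))), Dom_generate_implementation_status_py results → Pre_generate_implementation_status_py results → Spec_generate_implementation_status_py results (generate_implementation_status_py results)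

-- ===== LEMMAS AND PROOFS =====

-- the success rate read by both ports
def pvSr (p : String × List (String × Int)) : Int :=
  ((PySem.Dict.mk p.2).get? "success_rate").getD 0

-- one promotion sweep of B over a dict whose items are exactly 'pre' followed by the phases:
-- it rewrites, in place, the value of every phase meeting the cutoff.
lemma pass_items (cutoff : Int) (lab : String) :
    ∀ (ps : List (String × List (String × Int))) (d : PySem.Dict String String)
      (pre : List (String × String)) (g : (String × List (String × Int)) → String),
      d.items = pre ++ ps.map (fun p => (p.1, g p)) →
      (pre.map Prod.fst ++ ps.map Prod.fst).Nodup →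
      (ps.foldl (fun st p => if pvSr p ≥ cutoff then st.insert p.1 lab else st) d).items
        = pre ++ ps.map (fun p => (p.1, if pvSr p ≥ cutoff then lab else g p)) := by
  intro ps
  induction ps with
  | nil => intro d pre g h _; simpa using h
  | cons p rest ih =>
    intro d pre g h hnd
    have hp_pre : ∀ q ∈ pre, q.1 ≠ p.1 := by
      intro q hq
      have h1 : q.1 ∈ pre.map Prod.fst := List.mem_map_of_mem hq
      intro he
      exact (List.disjoint_of_nodup_append hnd) h1
        (by rw [List.map_cons, he]; exact List.mem_cons_self)
    have hp_rest : ∀ q ∈ rest, q.1 ≠ p.1 := by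
      have := (List.nodup_append.mp hnd).2.1
      simp only [List.map_cons, List.nodup_cons] at this
      intro q hq he
      exact this.1 (he ▸ List.mem_map_of_mem hq)
    simp only [List.foldl_cons, List.map_cons]
    by_cases hc : pvSr p ≥ cutoff
    · simp only [hc, if_pos]
      have hcont : d.contains p.1 = true := by
        rw [PySem.Dict.contains_iff_mem_keys]
        show p.1 ∈ d.items.map Prod.fst
        rw [h]; simp
      have hitems' : (d.insert p.1 lab).items
          = (pre ++ [(p.1, lab)]) ++ rest.map (fun q => (q.1, g q)) := by
        rw [PySem.Dict.items_insert_of_contains _ _ hcont, h]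
        simp only [List.map_append, List.map_cons, List.append_assoc]
        congr 1
        · refine List.map_congr_left (fun q hq => ?_) |>.trans (List.map_id pre)
          simp [hp_pre q hq]
        · congr 1
          · simp
          · refine List.map_congr_left (fun q hq => ?_) |>.trans (List.map_id _)
            rcases List.mem_map.mp hq with ⟨r, hr, rfl⟩
            simp [hp_rest r hr]
      have := ih (d.insert p.1 lab) (pre ++ [(p.1, lab)]) g hitems'
        (by simpa [List.append_assoc] using hnd)
      simpa [List.append_assoc] using this
    · simp only [hc, if_neg, not_false_iff]
      have := ih d (pre ++ [(p.1, g p)]) g (by simpa [List.append_assoc] using h)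
        (by simpa [List.append_assoc] using hnd)
      simpa [List.append_assoc, hc] using this

-- A's cascade label as a function of the success rate
def pvLabel (sr : Int) : String :=
  if sr ≥ 80 then "Complete" else if sr ≥ 50 then "Partial" else "Needs Work"

-- A's loop inserts exactly the cascade label for each phase
lemma a_items (ps : List (String × List (String × Int))) (hnd : (ps.map Prod.fst).Nodup) :
    (ps.foldl
      (fun (phase_status : PySem.Dict String String) p =>
        let sr := ((PySem.Dict.mk p.2).get? "success_rate").getD 0
        if sr ≥ 80 then phase_status.insert p.1 "Complete"
        else if sr ≥ 50 then phase_status.insert p.1 "Partial"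
        else phase_status.insert p.1 "Needs Work")
      PySem.Dict.empty).items
      = ps.map (fun p => (p.1, pvLabel (pvSr p))) := by
  have hbody : (fun (phase_status : PySem.Dict String String) p =>
        let sr := ((PySem.Dict.mk p.2).get? "success_rate").getD 0
        if sr ≥ 80 then phase_status.insert p.1 "Complete"
        else if sr ≥ 50 then phase_status.insert p.1 "Partial"
        else phase_status.insert p.1 "Needs Work")
      = (fun (phase_status : PySem.Dict String String) (p : String × List (String × Int)) =>
          phase_status.insert p.1 (pvLabel (pvSr p))) := by
    funext d p
    simp only [pvLabel, pvSr]
    split_ifs <;> rfl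
  rw [hbody,
    PySem.Dict.items_foldl_insert_fresh ps Prod.fst (fun p => pvLabel (pvSr p))
      PySem.Dict.empty (by intro a _; simp [PySem.Dict.contains_empty]) hnd]
  simp [PySem.Dict.empty]

-- B's initial comprehension {k: "Needs Work"} has exactly the phases as items
lemma b_init_items (ps : List (String × List (String × Int))) (hnd : (ps.map Prod.fst).Nodup) :
    (PySem.Dict.ofList (ps.map (fun p => (p.1, "Needs Work")))).items
      = ps.map (fun p => (p.1, "Needs Work")) := by
  show ((ps.map (fun p => (p.1, "Needs Work"))).foldl
      (fun (d : PySem.Dict String String) a => d.insert a.1 a.2) PySem.Dict.empty).items = _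
  rw [PySem.Dict.items_foldl_insert_fresh _ Prod.fst Prod.snd PySem.Dict.empty
      (by intro a _; simp [PySem.Dict.contains_empty])
      (by simpa [List.map_map, Function.comp] using hnd)]
  simp [PySem.Dict.empty, Prod.mk.eta]

-- ===== VERDICT (by name: the statement is the Claim_ definition above) =====
theorem generate_implementation_status_py_spec : Claim_equal_generate_implementation_status_py := by
  intro results _ hpre
  obtain ⟨-, -, hnd⟩ := hpre
  unfold Spec_generate_implementation_status_py
  unfold generate_implementation_status_py generate_implementation_status_py_alt
  cases h : (PySem.Dict.mk results).get? "phase_results" with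
  | none => rfl
  | some ps =>
    rw [h] at hnd; simp only [Option.getD_some] at hnd
    -- unfold B's two sweeps
    simp only [List.foldl_cons, List.foldl_nil]
    -- first sweep: promote ≥ 50 to "Partial"
    have h1 := pass_items 50 "Partial" ps
      (PySem.Dict.ofList (ps.map (fun p => (p.1, "Needs Work"))))
      [] (fun _ => "Needs Work") (by simpa using b_init_items ps hnd) (by simpa using hnd)
    -- second sweep: promote ≥ 80 to "Complete", over the dict left by the first sweep
    have hd1 : (ps.foldl (fun st p => if pvSr p ≥ 50 then st.insert p.1 "Partial" else st)
        (PySem.Dict.ofList (ps.map (fun p => (p.1, "Needs Work"))))).items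
        = ps.map (fun p => (p.1, if pvSr p ≥ 50 then "Partial" else "Needs Work")) := by
      simpa using h1
    have h2 := pass_items 80 "Complete" ps
      (ps.foldl (fun st p => if pvSr p ≥ 50 then st.insert p.1 "Partial" else st)
        (PySem.Dict.ofList (ps.map (fun p => (p.1, "Needs Work")))))
      [] (fun p => if pvSr p ≥ 50 then "Partial" else "Needs Work")
      (by simpa using hd1) (by simpa using hnd)
    have h2' : (ps.foldl (fun st p =>
        if ((PySem.Dict.mk p.2).get? "success_rate").getD 0 ≥ 80 then st.insert p.1 "Complete" else st)
        (ps.foldl (fun st p =>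
          if ((PySem.Dict.mk p.2).get? "success_rate").getD 0 ≥ 50 then st.insert p.1 "Partial" else st)
          (PySem.Dict.ofList (ps.map (fun p => (p.1, "Needs Work")))))).items
        = ps.map (fun p => (p.1, if pvSr p ≥ 80 then "Complete"
            else if pvSr p ≥ 50 then "Partial" else "Needs Work")) := by
      simpa [pvSr] using h2
    rw [a_items ps hnd, h2']
    exact List.map_congr_left (fun p _ => by simp [pvLabel])
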